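-- pv_equiv track=rewrite | github.com/jcraig949jfi/Prometheus | forge/candidates/t2_strategic_deception_010.py | _fallback_reason
-- ===== SOURCE A (Python) =====
-- from typing import Dict, List, Any
--
-- def _fallback_reason(structure: Dict[str, Any]) -> str:
--     """Fallback reasoning when game theory fails - still uses primitives."""
--     agents = structure["agents"]
--     deception_indicators = structure["deception_indicators"]
--
--     if not agents:
--         return "No clear answer"
--
--     # Use deception indicators to guess
--     if deception_indicators:
--         # Find agent mentioned in deception context
--         for agent in agents:
--             for indicator in deception_indicators:
--                 if agent.lower() in indicator.lower():
--                     return agent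
--
--     # Default: first agent
--     return agents[0]
-- ===== SOURCE B (Python) =====
-- from typing import Dict, List, Any
--
-- def _fallback_reason(structure: Dict[str, Any]) -> str:
--     """Fallback reasoning when game theory fails - still uses primitives."""
--     agents = structure["agents"]
--     deception_indicators = structure["deception_indicators"]
--
--     if not agents:
--         return "No clear answer"
--     if not deception_indicators:
--         return agents[0]
--
--     # One prebuilt lowercased haystack; "\x00" cannot occur in the text,
--     # so a match never spans two indicators.
--     blob = "\x00".join(ind.lower() for ind in deception_indicators)
--     return next((a for a in agents if a.lower() in blob), agents[0])
-- ===== Notes on version B (the rewrite author's own statement) =====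
-- stated objective: alternative
-- what changed: B lowercases and joins all indicators once into a single NUL-separated haystack and then selects the first matching agent with a single next()/find over agents, replacing A's nested per-agent rescan of every indicator with explicit loops.
import Mathlib
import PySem

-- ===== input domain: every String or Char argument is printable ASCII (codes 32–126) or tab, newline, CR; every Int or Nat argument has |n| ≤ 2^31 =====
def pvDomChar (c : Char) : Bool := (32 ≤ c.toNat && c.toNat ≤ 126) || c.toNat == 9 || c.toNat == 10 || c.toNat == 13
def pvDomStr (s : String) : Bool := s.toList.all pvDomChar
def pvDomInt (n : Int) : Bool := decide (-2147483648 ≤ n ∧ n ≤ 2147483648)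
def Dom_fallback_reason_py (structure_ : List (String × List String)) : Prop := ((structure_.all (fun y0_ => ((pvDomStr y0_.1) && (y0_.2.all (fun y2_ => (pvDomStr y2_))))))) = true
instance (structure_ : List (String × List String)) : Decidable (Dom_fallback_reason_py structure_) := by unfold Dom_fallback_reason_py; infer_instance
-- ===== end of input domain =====

-- B builds one NUL-joined lowercased haystack and picks the first matching agent
-- with a single find over agents, replacing A's nested rescan (alternative decomposition).

-- ===== PORT A =====
-- inner loop: "for indicator in deception_indicators: if agent.lower() in indicator.lower(): return agent"
def fallbackInnerA (agent : String) : List String → Bool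
  | [] => false
  | ind :: rest =>
      if PySem.Str.isIn (PySem.Str.lower agent) (PySem.Str.lower ind) then true
      else fallbackInnerA agent rest

-- outer loop: "for agent in agents: …"
def fallbackOuterA (inds : List String) : List String → Option String
  | [] => none
  | a :: rest => if fallbackInnerA a inds then some a else fallbackOuterA inds rest

def fallback_reason_py (structure_ : List (String × List String)) : String :=
  let d := PySem.Dict.mk structure_
  let agents := d.getD "agents" []
  let deception_indicators := d.getD "deception_indicators" []
  match agents with
  | [] => "No clear answer"
  | a0 :: _ =>
      match (if deception_indicators ≠ [] then fallbackOuterA deception_indicators agents else none) with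
      | some a => a
      | none => a0

-- ===== PORT B =====
-- "return next((a for a in agents if a.lower() in blob), agents[0])"
def fallback_reason_py_alt (structure_ : List (String × List String)) : String :=
  let d := PySem.Dict.mk structure_
  let agents := d.getD "agents" []
  let deception_indicators := d.getD "deception_indicators" []
  match agents with
  | [] => "No clear answer"
  | a0 :: _ =>
      if deception_indicators = [] then a0
      else
        let blob := PySem.Str.join "\x00" (deception_indicators.map PySem.Str.lower)
        (agents.find? (fun a => PySem.Str.isIn (PySem.Str.lower a) blob)).getD a0

-- ===== PRECONDITION & SPEC =====
-- Pre_ excludes only the inputs where Python A raises KeyError: a dict missing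
-- the "agents" or "deception_indicators" key.
def Pre_fallback_reason_py (structure_ : List (String × List String)) : Prop :=
  (PySem.Dict.mk structure_).contains "agents" = true ∧
  (PySem.Dict.mk structure_).contains "deception_indicators" = true
instance (structure_ : List (String × List String)) : Decidable (Pre_fallback_reason_py structure_) := by unfold Pre_fallback_reason_py; infer_instance

def pvWitness_fallback_reason_py : (List (String × List String)) :=
  [("agents", ["Alice", "Bob"]), ("deception_indicators", ["bob lied"])]

def Spec_fallback_reason_py (structure_ : List (String × List String)) (out : String) : Prop := out = fallback_reason_py_alt structure_
instance (structure_ : List (String × List String)) (out : String) : Decidable (Spec_fallback_reason_py structure_ out) := by unfold Spec_fallback_reason_py; infer_instance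

-- ===== CLAIM (what is proved, stated in full; the proofs are below) =====
def Claim_equal_fallback_reason_py : Prop := ∀ (structure_ : List (String × List String)), Dom_fallback_reason_py structure_ → Pre_fallback_reason_py structure_ → Spec_fallback_reason_py structure_ (fallback_reason_py structure_)

-- ===== LEMMAS AND PROOFS =====

-- an infix containing no `c` of `x ++ c :: y` lies wholly in `x` or wholly in `y`
theorem pv_infix_append_cons {α : Type} {a x y : List α} {c : α} (hc : c ∉ a)
    (h : a <:+: x ++ c :: y) : a <:+: x ∨ a <:+: y := by
  obtain ⟨s, t, hst⟩ := h
  by_cases h1 : s.length + a.length ≤ x.length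
  · left
    have hp1 : s ++ a <+: x ++ c :: y := ⟨t, by simpa using hst⟩
    have hp2 : x <+: x ++ c :: y := ⟨c :: y, rfl⟩
    have hp : s ++ a <+: x :=
      List.prefix_of_prefix_length_le hp1 hp2 (by simp; omega)
    obtain ⟨t', ht'⟩ := hp
    exact ⟨s, t', by simpa using ht'⟩
  · by_cases h2 : x.length + 1 ≤ s.length
    · right
      have hs1 : a ++ t <:+ x ++ c :: y := ⟨s, by simpa using hst⟩
      have hs2 : y <:+ x ++ c :: y := ⟨x ++ [c], by simp⟩
      have hs : a ++ t <:+ y := by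
        have hlen : (a ++ t).length ≤ y.length := by
          have := congrArg List.length hst
          simp at this; simp; omega
        exact List.suffix_of_suffix_length_le hs1 hs2 hlen
      obtain ⟨s', hs'⟩ := hs
      exact ⟨s', t, by simpa using hs'⟩
    · exfalso
      have hst' : s ++ (a ++ t) = x ++ c :: y := by simpa [List.append_assoc] using hst
      have hlens := congrArg List.length hst'
      simp at hlens
      have h4 : x.length < (s ++ (a ++ t)).length := by simp; omega
      have e : (s ++ (a ++ t))[x.length]'h4 = (x ++ c :: y)[x.length]'(by simp) :=
        List.getElem_of_eq hst' h4
      have eL : (s ++ (a ++ t))[x.length]'h4 = (a ++ t)[x.length - s.length]'(by simp; omega) :=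
        List.getElem_append_right (by omega)
      have eL2 : (a ++ t)[x.length - s.length]'(by simp; omega) = a[x.length - s.length]'(by omega) :=
        List.getElem_append_left (by omega)
      have eR : (x ++ c :: y)[x.length]'(by simp) = c := by
        rw [List.getElem_append_right (by omega)]
        simp
      have hca : a[x.length - s.length]'(by omega) = c := by
        rw [← eL2, ← eL, e, eR]
      exact hc (hca ▸ List.getElem_mem _)

theorem pv_intercalate_singleton {α : Type} (s x : List α) :
    List.intercalate s [x] = x := by simp [List.intercalate]

theorem pv_intercalate_cons_cons {α : Type} (s p q : List α) (r : List (List α)) :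
    List.intercalate s (p :: q :: r) = p ++ s ++ List.intercalate s (q :: r) := by
  simp [List.intercalate, List.intersperse]

-- infix of a `[c]`-intercalation, `c ∉ a`: a is infix of one of the pieces
theorem pv_infix_intercalate {α : Type} {c : α} {a : List α} (hc : c ∉ a) :
    ∀ (xs : List (List α)), xs ≠ [] →
      (a <:+: List.intercalate [c] xs ↔ ∃ x ∈ xs, a <:+: x) := by
  intro xs
  induction xs with
  | nil => intro h; exact absurd rfl h
  | cons x rest ih =>
    intro _
    cases rest with
    | nil => simp [pv_intercalate_singleton]
    | cons x' rest' =>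
      rw [pv_intercalate_cons_cons]
      constructor
      · intro h
        rcases pv_infix_append_cons hc (by simpa using h) with h' | h'
        · exact ⟨x, by simp, h'⟩
        · obtain ⟨z, hz, hz'⟩ := (ih (by simp)).mp h'
          exact ⟨z, by simp [hz], hz'⟩
      · rintro ⟨z, hz, hz'⟩
        rcases List.mem_cons.mp hz with rfl | hz2
        · exact hz'.trans ⟨[], [c] ++ List.intercalate [c] (x' :: rest'), by simp⟩
        · have : a <:+: List.intercalate [c] (x' :: rest') :=
            (ih (by simp)).mpr ⟨z, hz2, hz'⟩
          exact this.trans ⟨x ++ [c], [], by simp⟩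

-- A's inner loop is an existential over the indicators
theorem pv_innerA_iff (agent : String) (inds : List String) :
    fallbackInnerA agent inds = true ↔
      ∃ ind ∈ inds, PySem.Str.isIn (PySem.Str.lower agent) (PySem.Str.lower ind) = true := by
  induction inds with
  | nil => simp [fallbackInnerA]
  | cons i rest ih =>
    unfold fallbackInnerA
    by_cases h : PySem.Str.isIn (PySem.Str.lower agent) (PySem.Str.lower i) = true
    · rw [if_pos h]
      exact iff_of_true rfl ⟨i, by simp, h⟩
    · rw [if_neg h, ih]
      constructor
      · rintro ⟨ind, hm, hh⟩; exact ⟨ind, by simp [hm], hh⟩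
      · rintro ⟨ind, hm, hh⟩
        rcases List.mem_cons.mp hm with rfl | hm2
        · exact absurd hh h
        · exact ⟨ind, hm2, hh⟩

-- lowering a domain character never yields NUL
theorem pv_lowerChar_ne_nul {ch : Char} (hd : pvDomChar ch = true) :
    PySem.Chars.lowerChar ch ≠ '\x00' := by
  unfold PySem.Chars.lowerChar
  by_cases hu : PySem.Chars.isupper ch = true
  · rw [if_pos hu]
    have h1 : 65 ≤ ch.toNat ∧ ch.toNat ≤ 90 := by
      simp [PySem.Chars.isupper, Char.le_def] at hu
      exact ⟨hu.1, hu.2⟩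
    intro h
    have hv : Nat.isValidChar (ch.toNat + 32) := Or.inl (by omega)
    have ht := congrArg Char.toNat h
    rw [Char.toNat_ofNat, if_pos hv] at ht
    have : ch.toNat + 32 = 0 := by simp at ht
    omega
  · rw [if_neg hu]
    intro h
    subst h
    simp [pvDomChar] at hd

-- under Dom, an agent's lowercase form contains no NUL
theorem pv_nul_not_mem_lower {s : String} (hd : pvDomStr s = true) :
    '\x00' ∉ (PySem.Str.lower s).toList := by
  rw [PySem.Str.toList_lower]
  intro hmem
  simp only [PySem.Chars.lower, List.mem_map] at hmem
  obtain ⟨ch, hch, hval⟩ := hmem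
  have : pvDomChar ch = true := by
    simp [pvDomStr, List.all_eq_true] at hd
    exact hd ch hch
  exact pv_lowerChar_ne_nul this hval

-- the key step: one substring test against the NUL-joined haystack equals A's inner scan
theorem pv_blob_eq_inner (agent : String) (inds : List String)
    (hne : inds ≠ [])
    (hc : '\x00' ∉ (PySem.Str.lower agent).toList) :
    PySem.Str.isIn (PySem.Str.lower agent)
        (PySem.Str.join "\x00" (inds.map PySem.Str.lower)) =
      fallbackInnerA agent inds := by
  rw [Bool.eq_iff_iff, pv_innerA_iff]
  rw [PySem.Str.isIn_eq, PySem.Chars.isIn_iff_infix]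
  have htl : (PySem.Str.join "\x00" (inds.map PySem.Str.lower)).toList =
      List.intercalate ['\x00'] ((inds.map PySem.Str.lower).map String.toList) := by
    simp [PySem.Str.join, PySem.Chars.join]
  rw [htl, pv_infix_intercalate hc _ (by simp [hne])]
  constructor
  · rintro ⟨x, hx, hinf⟩
    simp only [List.map_map, List.mem_map, Function.comp] at hx
    obtain ⟨ind, hind, rfl⟩ := hx
    exact ⟨ind, hind, by rw [PySem.Str.isIn_eq, PySem.Chars.isIn_iff_infix]; exact hinf⟩
  · rintro ⟨ind, hind, hmatch⟩
    rw [PySem.Str.isIn_eq, PySem.Chars.isIn_iff_infix] at hmatch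
    refine ⟨(PySem.Str.lower ind).toList, ?_, hmatch⟩
    simp only [List.map_map, List.mem_map, Function.comp]
    exact ⟨ind, hind, rfl⟩

-- A's outer loop is a find? against the haystack predicate
theorem pv_outerA_eq_find (inds : List String) (hne : inds ≠ []) :
    ∀ (agents : List String),
      (∀ a ∈ agents, '\x00' ∉ (PySem.Str.lower a).toList) →
      fallbackOuterA inds agents =
        agents.find? (fun a =>
          PySem.Str.isIn (PySem.Str.lower a)
            (PySem.Str.join "\x00" (inds.map PySem.Str.lower))) := by
  intro agents
  induction agents with
  | nil => intro _; rfl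
  | cons a rest ih =>
    intro h
    have ha := h a (by simp)
    rw [List.find?_cons]
    simp only [fallbackOuterA, pv_blob_eq_inner a inds hne ha]
    by_cases hb : fallbackInnerA a inds = true
    · simp [hb]
    · simp only [Bool.not_eq_true] at hb
      simp [hb, ih (fun x hx => h x (by simp [hx]))]

-- a getD value is [] or one of the dict's stored values
theorem pv_getD_cases (l : List (String × List String)) (k : String) :
    (PySem.Dict.mk l).getD k [] = [] ∨ ∃ p ∈ l, (PySem.Dict.mk l).getD k [] = p.2 := by
  induction l with
  | nil => left; rfl
  | cons p rest ih =>
    rw [PySem.Dict.getD_eq_get?_getD, PySem.Dict.get?_mk_cons]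
    by_cases h : p.1 == k
    · right; exact ⟨p, by simp, by simp [h]⟩
    · rw [if_neg h, ← PySem.Dict.getD_eq_get?_getD]
      rcases ih with h' | ⟨q, hq, hq'⟩
      · left; exact h'
      · right; exact ⟨q, by simp [hq], hq'⟩

-- under Dom, every string in an agents value is a domain string
theorem pv_agents_dom {structure_ : List (String × List String)}
    (hdom : Dom_fallback_reason_py structure_) (k : String) :
    ∀ a ∈ (PySem.Dict.mk structure_).getD k [], pvDomStr a = true := by
  rcases pv_getD_cases structure_ k with h | ⟨p, hp, hp'⟩
  · rw [h]; intro a ha; simp at ha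
  · rw [hp']
    unfold Dom_fallback_reason_py at hdom
    rw [List.all_eq_true] at hdom
    have := hdom p hp
    rw [Bool.and_eq_true, List.all_eq_true] at this
    exact fun a ha => this.2 a ha

-- ===== VERDICT (by name: the statement is the Claim_ definition above) =====
theorem fallback_reason_py_spec : Claim_equal_fallback_reason_py := by
  intro structure_ hdom _
  unfold Spec_fallback_reason_py fallback_reason_py fallback_reason_py_alt
  simp only []
  cases hag : (PySem.Dict.mk structure_).getD "agents" [] with
  | nil => rfl
  | cons a0 rest =>
    by_cases hin : (PySem.Dict.mk structure_).getD "deception_indicators" [] = []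
    · simp only [hin, ne_eq, not_true_eq_false, if_false, if_true]
    · simp only [hin, ne_eq, not_false_eq_true, if_true, if_false,
        pv_outerA_eq_find _ hin (a0 :: rest)
          (fun a ha => pv_nul_not_mem_lower (pv_agents_dom hdom "agents" a (hag ▸ ha)))]
      cases List.find? _ (a0 :: rest) <;> rfl
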